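-- pv_equiv track=rewrite | github.com/YashwanthKothakota9/python-dsa | SlidingWindow/longest_subarray_with_ones.py | length_longest_subarray_with_ones
-- ===== SOURCE A (Python) =====
-- def length_longest_subarray_with_ones(arr, k):
--     window_start, max_length, max_ones_count = 0, 0, 0
--     for window_end in range(len(arr)):
--         if arr[window_end]==1:
--             max_ones_count += 1
--         if window_end-window_start+1 - max_ones_count > k:
--             if arr[window_start] == 1:
--                 max_ones_count -= 1
--             window_start += 1
--         max_length = max(max_length, window_end-window_start+1)
--     return max_length
-- ===== SOURCE B (Python) =====
-- def length_longest_subarray_with_ones(arr, k):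
--     # prefix counts of non-1 elements, then for each end binary-search the
--     # smallest start with at most k non-ones in arr[start:end+1]
--     pre = [0]
--     for x in arr:
--         pre.append(pre[-1] + (x != 1))
--     best = 0
--     for end in range(len(arr)):
--         target = pre[end + 1] - k
--         lo, hi = 0, len(pre)
--         while lo < hi:
--             mid = (lo + hi) // 2
--             if pre[mid] < target:
--                 lo = mid + 1
--             else:
--                 hi = mid
--         best = max(best, end + 1 - lo)
--     return best
-- ===== Notes on version B (the rewrite author's own statement) =====
-- stated objective: alternative
-- what changed: Replaces the two-pointer sliding window with a precomputed prefix array of non-one counts plus a per-end binary search for the smallest feasible window start.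
import Mathlib
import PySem

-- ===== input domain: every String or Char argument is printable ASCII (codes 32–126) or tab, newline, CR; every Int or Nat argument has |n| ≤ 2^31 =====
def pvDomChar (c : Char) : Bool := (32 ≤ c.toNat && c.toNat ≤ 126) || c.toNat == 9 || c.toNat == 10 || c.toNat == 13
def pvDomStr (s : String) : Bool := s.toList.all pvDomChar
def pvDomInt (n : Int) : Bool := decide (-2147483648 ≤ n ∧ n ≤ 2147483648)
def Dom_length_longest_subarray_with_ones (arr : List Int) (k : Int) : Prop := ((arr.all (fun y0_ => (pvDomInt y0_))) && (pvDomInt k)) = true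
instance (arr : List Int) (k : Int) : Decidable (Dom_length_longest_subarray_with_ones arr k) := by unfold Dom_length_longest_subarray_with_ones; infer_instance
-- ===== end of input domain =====

-- B replaces A's two-pointer sliding window by a prefix-count array plus a per-end
-- binary search for the smallest feasible start (alternative decomposition; not faster).

-- ===== PORT A =====
-- Literal transliteration of A's sliding-window loop; all indexing is in range,
-- so pyGetD is exact here.
def length_longest_subarray_with_ones (arr : List Int) (k : Int) : Int :=
  let st := (PySem.List.pyRange 0 (arr.length : Int) 1).foldl
    (fun (s : Int × Int × Int) window_end =>
      let window_start := s.1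
      let max_length := s.2.1
      let max_ones_count :=
        if PySem.List.pyGetD arr window_end 0 = 1 then s.2.2 + 1 else s.2.2
      let p :=
        if window_end - window_start + 1 - max_ones_count > k then
          (window_start + 1,
           if PySem.List.pyGetD arr window_start 0 = 1 then max_ones_count - 1 else max_ones_count)
        else (window_start, max_ones_count)
      (p.1, max max_length (window_end - p.1 + 1), p.2))
    (0, 0, 0)
  st.2.1

-- ===== PORT B =====
-- Python's while-loop binary search (bisect_left), transcribed with Nat bounds
-- (the Python lo/hi are nonnegative throughout).
def pvBisect (a : List Int) (t : Int) (lo hi : Nat) : Nat :=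
  if h : lo < hi then
    if PySem.List.pyGetD a (((lo + hi) / 2 : Nat) : Int) 0 < t then
      pvBisect a t ((lo + hi) / 2 + 1) hi
    else
      pvBisect a t lo ((lo + hi) / 2)
  else lo
termination_by hi - lo
decreasing_by all_goals omega

def length_longest_subarray_with_ones_alt (arr : List Int) (k : Int) : Int :=
  let pre := arr.foldl
    (fun acc x => acc ++ [PySem.List.pyGetD acc (-1) 0 + (if x ≠ 1 then 1 else 0)]) [0]
  (List.range arr.length).foldl
    (fun (best : Int) (e : Nat) =>
      let target := PySem.List.pyGetD pre ((e : Int) + 1) 0 - k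
      let lo := pvBisect pre target 0 pre.length
      max best ((e : Int) + 1 - (lo : Int)))
    0

-- ===== PRECONDITION & SPEC =====
def Spec_length_longest_subarray_with_ones (arr : List Int) (k : Int) (out : Int) : Prop := out = length_longest_subarray_with_ones_alt arr k
instance (arr : List Int) (k : Int) (out : Int) : Decidable (Spec_length_longest_subarray_with_ones arr k out) := by unfold Spec_length_longest_subarray_with_ones; infer_instance

-- ===== CLAIM (what is proved, stated in full; the proofs are below) =====
def Claim_equal_length_longest_subarray_with_ones : Prop := ∀ (arr : List Int) (k : Int), Dom_length_longest_subarray_with_ones arr k → Spec_length_longest_subarray_with_ones arr k (length_longest_subarray_with_ones arr k)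

-- ===== LEMMAS AND PROOFS =====

-- number of non-1 entries among the first j elements
def pvZ (arr : List Int) (j : Nat) : Nat := (arr.take j).countP (fun x => x != 1)

-- A's window_start after i loop iterations
def pvF (arr : List Int) (k : Int) : Nat → Nat
  | 0 => 0
  | i + 1 =>
    pvF arr k i +
      (if ((pvZ arr (i + 1) : Int) - (pvZ arr (pvF arr k i) : Int)) > k then 1 else 0)

-- the prefix array B builds
def pvPre (arr : List Int) : List Int :=
  (List.range (arr.length + 1)).map (fun j => (pvZ arr j : Int))

-- B's running maximum after i iterations
def pvG (arr : List Int) (k : Int) : Nat → Int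
  | 0 => 0
  | i + 1 =>
    max (pvG arr k i)
      ((i : Int) + 1 -
        (pvBisect (pvPre arr) ((pvZ arr (i + 1) : Int) - k) 0 (arr.length + 1) : Int))

theorem pvF_succ (arr : List Int) (k : Int) (i : Nat) :
    pvF arr k i +
      (if ((pvZ arr (i + 1) : Int) - (pvZ arr (pvF arr k i) : Int)) > k then 1 else 0)
      = pvF arr k (i + 1) := rfl

theorem pvZ_mono (arr : List Int) {i j : Nat} (h : i ≤ j) : pvZ arr i ≤ pvZ arr j := by
  unfold pvZ
  have h1 : arr.take i = (arr.take j).take i := by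
    rw [List.take_take, Nat.min_eq_left h]
  rw [h1]
  exact List.Sublist.countP_le (List.take_sublist _ _)

theorem pvZ_succ (arr : List Int) {j : Nat} (h : j < arr.length) :
    pvZ arr (j + 1) = pvZ arr j + (if arr.getD j 0 = 1 then 0 else 1) := by
  unfold pvZ
  rw [List.take_add_one, List.getElem?_eq_getElem h, List.countP_append,
    List.getD_eq_getElem?_getD, List.getElem?_eq_getElem h]
  by_cases h1 : arr[j] = 1 <;> simp [h1]

theorem pvF_le (arr : List Int) (k : Int) (i : Nat) : pvF arr k i ≤ i := by
  induction i with
  | zero => simp [pvF]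
  | succ n ih => rw [← pvF_succ]; split <;> omega

theorem pvF_mono_succ (arr : List Int) (k : Int) (i : Nat) :
    pvF arr k i ≤ pvF arr k (i + 1) ∧ pvF arr k (i + 1) ≤ pvF arr k i + 1 := by
  rw [← pvF_succ]; split <;> omega

theorem pvF_diff_mono (arr : List Int) (k : Int) {i j : Nat} (h : i ≤ j) :
    (i : Int) - pvF arr k i ≤ (j : Int) - pvF arr k j := by
  induction j with
  | zero => interval_cases i; simp
  | succ n ih =>
    rcases Nat.lt_or_ge i (n + 1) with hlt | hge
    · have h1 := ih (by omega)
      have h2 := pvF_mono_succ arr k n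
      push_cast
      push_cast at h1
      omega
    · have : i = n + 1 := by omega
      subst this
      exact le_refl _

-- key lemma: if the window [s, j) has at most k non-ones, A's start never passes s
theorem pvF_le_of_valid (arr : List Int) (k : Int) {s j : Nat}
    (hv : (pvZ arr j : Int) - pvZ arr s ≤ k) :
    ∀ i, i ≤ j → pvF arr k i ≤ s := by
  intro i
  induction i with
  | zero => intro _; simp [pvF]
  | succ n ih =>
    intro hle
    have ihn := ih (by omega)
    have hms := pvF_mono_succ arr k n
    rcases Nat.lt_or_ge (pvF arr k n) s with hlt | hge
    · omega
    · have hfs : pvF arr k n = s := by omega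
      rw [← pvF_succ, hfs]
      have hz : pvZ arr (n + 1) ≤ pvZ arr j := pvZ_mono arr (by omega)
      have hneg : ¬ ((pvZ arr (n + 1) : Int) - (pvZ arr s : Int) > k) := by
        omega
      rw [if_neg hneg]
      omega

theorem pvPre_getD (arr : List Int) {i : Nat} (h : i < arr.length + 1) :
    (pvPre arr).getD i 0 = (pvZ arr i : Int) := by
  simp [pvPre, List.getD_eq_getElem?_getD, h]

theorem pvPre_length (arr : List Int) : (pvPre arr).length = arr.length + 1 := by
  simp [pvPre]

-- the fold in port B builds exactly pvPre
theorem pvPre_eq (arr : List Int) :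
    arr.foldl (fun acc x => acc ++ [PySem.List.pyGetD acc (-1) 0 + (if x ≠ 1 then 1 else 0)]) [0]
      = pvPre arr := by
  induction arr using List.reverseRecOn with
  | nil => rfl
  | append_singleton xs x ih =>
    rw [List.foldl_append, ih]
    have hzsame : ∀ j : Nat, j ≤ xs.length → pvZ (xs ++ [x]) j = pvZ xs j := by
      intro j hj
      unfold pvZ
      rw [List.take_append_of_le_length hj]
    have hzlast : pvZ (xs ++ [x]) (xs.length + 1)
        = pvZ xs xs.length + (if x ≠ 1 then 1 else 0) := by
      unfold pvZ
      rw [show xs.length + 1 = (xs ++ [x]).length by simp, List.take_length,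
        List.countP_append, List.take_of_length_le (le_refl _)]
      by_cases hx : x = 1 <;> simp [hx]
    have hsplit : pvPre xs
        = (List.range xs.length).map (fun j => (pvZ xs j : Int)) ++ [(pvZ xs xs.length : Int)] := by
      unfold pvPre
      rw [List.range_succ, List.map_append]
      rfl
    have hlast : PySem.List.pyGetD (pvPre xs) (-1) 0 = (pvZ xs xs.length : Int) := by
      rw [hsplit, PySem.List.pyGetD_neg_one_append_singleton]
    have hR : pvPre (xs ++ [x])
        = pvPre xs ++ [(pvZ xs xs.length : Int) + (if x ≠ 1 then 1 else 0)] := by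
      unfold pvPre
      rw [show (xs ++ [x]).length = xs.length + 1 by simp, List.range_succ, List.map_append]
      congr 1
      · apply List.map_congr_left
        intro j hj
        rw [List.mem_range] at hj
        rw [hzsame j (by omega)]
      · simp only [List.map_cons, List.map_nil]
        congr 1
        rw [hzlast]
        by_cases hx : x = 1 <;> simp [hx]
    simp only [List.foldl_cons, List.foldl_nil, hlast]
    rw [hR]

theorem pvBisect_spec (a : List Int) (t : Int)
    (hmono : ∀ i j : Nat, i ≤ j → j < a.length → a.getD i 0 ≤ a.getD j 0) :
    ∀ d lo hi : Nat, hi - lo = d → lo ≤ hi → hi ≤ a.length →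
      (∀ i, i < lo → a.getD i 0 < t) →
      (∀ i, hi ≤ i → i < a.length → t ≤ a.getD i 0) →
      lo ≤ pvBisect a t lo hi ∧ pvBisect a t lo hi ≤ hi ∧
        (∀ i, i < pvBisect a t lo hi → a.getD i 0 < t) ∧
        (pvBisect a t lo hi < a.length → t ≤ a.getD (pvBisect a t lo hi) 0) := by
  intro d
  induction d using Nat.strong_induction_on with
  | _ d ihd =>
    intro lo hi hd hlh hhl hlow hhigh
    rw [pvBisect]
    by_cases h : lo < hi
    · rw [dif_pos h]
      have hmlo : lo ≤ (lo + hi) / 2 := by omega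
      have hmhi : (lo + hi) / 2 < hi := by omega
      have hmlen : (lo + hi) / 2 < a.length := by omega
      rw [PySem.List.pyGetD_natCast]
      by_cases hc : a.getD ((lo + hi) / 2) 0 < t
      · rw [if_pos hc]
        have res := ihd (hi - ((lo + hi) / 2 + 1)) (by omega) ((lo + hi) / 2 + 1) hi rfl
          (by omega) hhl
          (fun i hi2 => lt_of_le_of_lt (hmono i ((lo + hi) / 2) (by omega) hmlen) hc)
          hhigh
        exact ⟨by omega, res.2.1, res.2.2.1, res.2.2.2⟩
      · rw [if_neg hc]
        have hc' : t ≤ a.getD ((lo + hi) / 2) 0 := by omega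
        have res := ihd ((lo + hi) / 2 - lo) (by omega) lo ((lo + hi) / 2) rfl
          (by omega) (by omega) hlow
          (fun i hge hlt => le_trans hc' (hmono ((lo + hi) / 2) i hge hlt))
        exact ⟨res.1, by omega, res.2.2.1, res.2.2.2⟩
    · rw [dif_neg h]
      exact ⟨le_refl _, by omega, hlow, fun h2 => hhigh lo (by omega) h2⟩

-- invariant of A's loop: state = (start, current window length, ones in window)
theorem portA_state (arr : List Int) (k : Int) :
    ∀ m, m ≤ arr.length →
    (List.range m).foldl
      (fun (s : Int × Int × Int) (j : Nat) =>
        (fun (s : Int × Int × Int) (window_end : Int) =>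
          let window_start := s.1
          let max_length := s.2.1
          let max_ones_count :=
            if PySem.List.pyGetD arr window_end 0 = 1 then s.2.2 + 1 else s.2.2
          let p :=
            if window_end - window_start + 1 - max_ones_count > k then
              (window_start + 1,
               if PySem.List.pyGetD arr window_start 0 = 1 then max_ones_count - 1 else max_ones_count)
            else (window_start, max_ones_count)
          (p.1, max max_length (window_end - p.1 + 1), p.2)) s (j : Int))
      (0, 0, 0)
    = ((pvF arr k m : Int), (m : Int) - pvF arr k m,
       ((m : Int) - pvF arr k m) - ((pvZ arr m : Int) - (pvZ arr (pvF arr k m) : Int))) := by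
  intro m
  induction m with
  | zero => intro _; simp [pvF, pvZ]
  | succ n ih =>
    intro hle
    have hfle := pvF_le arr k n
    have hfle' := pvF_le arr k (n + 1)
    have hms := pvF_mono_succ arr k n
    have hzm := pvZ_succ arr (show n < arr.length by omega)
    have hzf := pvZ_succ arr (show pvF arr k n < arr.length by omega)
    have hzmono : pvZ arr (pvF arr k n) ≤ pvZ arr n := pvZ_mono arr (by omega)
    have hzmono' : pvZ arr n ≤ pvZ arr (n + 1) := pvZ_mono arr (by omega)
    rw [List.range_succ, List.foldl_append, ih (by omega)]
    simp only [List.foldl_cons, List.foldl_nil, PySem.List.pyGetD_natCast]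
    have hpvf := pvF_succ arr k n
    by_cases h1 : arr.getD n 0 = 1 <;>
      by_cases h2 : arr.getD (pvF arr k n) 0 = 1 <;>
        simp only [h1, h2, if_true, if_false] at hzm hzf ⊢ <;>
          rw [← hpvf] <;>
            (refine Prod.ext ?_ (Prod.ext ?_ ?_)) <;> simp only [] <;>
              split_ifs <;> simp only [Nat.add_zero] <;> push_cast <;> omega

-- A's port computes n - pvF n
theorem portA_eq (arr : List Int) (k : Int) :
    length_longest_subarray_with_ones arr k = (arr.length : Int) - pvF arr k arr.length := by
  unfold length_longest_subarray_with_ones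
  rw [PySem.List.pyRange_zero_natCast, List.foldl_map, portA_state arr k arr.length (le_refl _)]

theorem portB_state (arr : List Int) (k : Int) :
    ∀ m, m ≤ arr.length →
    (List.range m).foldl
      (fun (best : Int) (e : Nat) =>
        let target := PySem.List.pyGetD (pvPre arr) ((e : Int) + 1) 0 - k
        let lo := pvBisect (pvPre arr) target 0 (pvPre arr).length
        max best ((e : Int) + 1 - (lo : Int)))
      0
    = pvG arr k m := by
  intro m
  induction m with
  | zero => intro _; simp [pvG]
  | succ n ih =>
    intro hle
    rw [List.range_succ, List.foldl_append, ih (by omega)]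
    simp only [List.foldl_cons, List.foldl_nil]
    have hcast : ((n : Nat) : Int) + 1 = (((n + 1 : Nat) : Nat) : Int) := by push_cast; ring
    rw [hcast, PySem.List.pyGetD_natCast, pvPre_getD arr (by omega), pvPre_length]
    rfl

-- B's port computes pvG n
theorem portB_eq (arr : List Int) (k : Int) :
    length_longest_subarray_with_ones_alt arr k = pvG arr k arr.length := by
  unfold length_longest_subarray_with_ones_alt
  rw [pvPre_eq]
  exact portB_state arr k arr.length (le_refl _)

theorem pvG_succ (arr : List Int) (k : Int) (i : Nat) :
    pvG arr k (i + 1)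
      = max (pvG arr k i)
          ((i : Int) + 1 -
            (pvBisect (pvPre arr) ((pvZ arr (i + 1) : Int) - k) 0 (arr.length + 1) : Int)) := rfl

theorem pvPre_mono (arr : List Int) :
    ∀ i j : Nat, i ≤ j → j < (pvPre arr).length → (pvPre arr).getD i 0 ≤ (pvPre arr).getD j 0 := by
  intro i j hij hj
  rw [pvPre_length] at hj
  rw [pvPre_getD arr (by omega), pvPre_getD arr (by omega)]
  exact_mod_cast pvZ_mono arr hij

-- what the binary search returns: the least feasible start for the window ending at e
theorem pvL_spec (arr : List Int) (k : Int) (e : Nat) (_he : e < arr.length) :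
    pvBisect (pvPre arr) ((pvZ arr (e + 1) : Int) - k) 0 (arr.length + 1) ≤ arr.length + 1 ∧
    (∀ s, s < pvBisect (pvPre arr) ((pvZ arr (e + 1) : Int) - k) 0 (arr.length + 1) →
      (pvZ arr s : Int) < (pvZ arr (e + 1) : Int) - k) ∧
    (pvBisect (pvPre arr) ((pvZ arr (e + 1) : Int) - k) 0 (arr.length + 1) < arr.length + 1 →
      (pvZ arr (e + 1) : Int) - k
        ≤ (pvZ arr (pvBisect (pvPre arr) ((pvZ arr (e + 1) : Int) - k) 0 (arr.length + 1)) : Int)) := by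
  have spec := pvBisect_spec (pvPre arr) ((pvZ arr (e + 1) : Int) - k) (pvPre_mono arr)
    (arr.length + 1) 0 (arr.length + 1) (by omega) (by omega) (by rw [pvPre_length])
    (fun i hi => absurd hi (Nat.not_lt_zero i))
    (by intro i h1 h2; rw [pvPre_length] at h2; omega)
  rw [pvPre_length] at spec
  refine ⟨spec.2.1, ?_, ?_⟩
  · intro s hs
    have h1 := spec.2.2.1 s hs
    rwa [pvPre_getD arr (by omega)] at h1
  · intro hlt
    have h1 := spec.2.2.2 hlt
    rwa [pvPre_getD arr (by omega)] at h1

theorem pvG_ge (arr : List Int) (k : Int) :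
    ∀ i, i ≤ arr.length → (i : Int) - pvF arr k i ≤ pvG arr k i := by
  intro i
  induction i with
  | zero => intro _; simp [pvG, pvF]
  | succ n ih =>
    intro hle
    have ihn := ih (by omega)
    have hspec := pvL_spec arr k n (by omega)
    rw [pvG_succ]
    by_cases hc : ((pvZ arr (n + 1) : Int) - (pvZ arr (pvF arr k n) : Int)) > k
    · have hf1 : pvF arr k (n + 1) = pvF arr k n + 1 := by rw [← pvF_succ, if_pos hc]
      refine le_max_iff.mpr (Or.inl ?_)
      rw [hf1]
      push_cast
      omega
    · have hf1 : pvF arr k (n + 1) = pvF arr k n := by rw [← pvF_succ, if_neg hc]; omega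
      have hLle : pvBisect (pvPre arr) ((pvZ arr (n + 1) : Int) - k) 0 (arr.length + 1)
          ≤ pvF arr k n := by
        by_contra h
        have := hspec.2.1 (pvF arr k n) (by omega)
        omega
      refine le_max_iff.mpr (Or.inr ?_)
      rw [hf1]
      push_cast
      omega

theorem pvG_le (arr : List Int) (k : Int) :
    ∀ i, i ≤ arr.length → pvG arr k i ≤ (arr.length : Int) - pvF arr k arr.length := by
  intro i
  induction i with
  | zero =>
    intro _
    have := pvF_le arr k arr.length
    simp only [pvG]
    omega
  | succ n ih =>
    intro hle
    have ihn := ih (by omega)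
    have hspec := pvL_spec arr k n (by omega)
    rw [pvG_succ]
    refine max_le ihn ?_
    rcases Nat.lt_or_ge n (pvBisect (pvPre arr) ((pvZ arr (n + 1) : Int) - k) 0 (arr.length + 1))
      with h | h
    · have := pvF_le arr k arr.length
      omega
    · have hv := hspec.2.2 (by omega)
      have hkey := pvF_le_of_valid arr k
        (show (pvZ arr (n + 1) : Int)
            - pvZ arr (pvBisect (pvPre arr) ((pvZ arr (n + 1) : Int) - k) 0 (arr.length + 1)) ≤ k
          by omega) (n + 1) (le_refl _)
      have hdm := pvF_diff_mono arr k (show n + 1 ≤ arr.length by omega)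
      push_cast at hdm ⊢
      omega

theorem pvG_eq (arr : List Int) (k : Int) :
    pvG arr k arr.length = (arr.length : Int) - pvF arr k arr.length := by
  exact le_antisymm (pvG_le arr k arr.length (le_refl _)) (pvG_ge arr k arr.length (le_refl _))

-- ===== VERDICT (by name: the statement is the Claim_ definition above) =====
theorem length_longest_subarray_with_ones_spec : Claim_equal_length_longest_subarray_with_ones := by
  intro arr k _
  unfold Spec_length_longest_subarray_with_ones
  rw [portA_eq, portB_eq, pvG_eq]
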